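-- pv_equiv track=rewrite | github.com/Original-Boy/TwoLevelFS | utils/PermissionCheck.py | is_valid_protection
-- ===== SOURCE A (Python) =====
-- def is_valid_protection(protection: str) -> bool:
--     # 检查字符串长度是否为9
--     if len(protection) != 9:
--         return False
--
--     # 检查指定位置的字符是否符合规则
--     for i, char in enumerate(protection):
--         if i in [0, 3, 6] and char not in ["r", "-"]:
--             return False
--         elif i in [1, 4, 7] and char not in ["w", "-"]:
--             return False
--         elif i in [2, 5, 8] and char not in ["x", "-"]:
--             return False
--
--     return True
-- ===== SOURCE B (Python) =====
-- import re
--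
-- _PROTECTION_RE = re.compile(r'(?:[r-][w-][x-]){3}')
--
-- def is_valid_protection(protection: str) -> bool:
--     return _PROTECTION_RE.fullmatch(protection) is not None
-- ===== Notes on version B (the rewrite author's own statement) =====
-- stated objective: idiomatic
-- what changed: Replaced the explicit enumerate loop with per-index membership tests by a single compiled regular expression fullmatch of (?:[r-][w-][x-]){3}, which encodes both the length-9 requirement and the positional character classes.
import Mathlib
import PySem

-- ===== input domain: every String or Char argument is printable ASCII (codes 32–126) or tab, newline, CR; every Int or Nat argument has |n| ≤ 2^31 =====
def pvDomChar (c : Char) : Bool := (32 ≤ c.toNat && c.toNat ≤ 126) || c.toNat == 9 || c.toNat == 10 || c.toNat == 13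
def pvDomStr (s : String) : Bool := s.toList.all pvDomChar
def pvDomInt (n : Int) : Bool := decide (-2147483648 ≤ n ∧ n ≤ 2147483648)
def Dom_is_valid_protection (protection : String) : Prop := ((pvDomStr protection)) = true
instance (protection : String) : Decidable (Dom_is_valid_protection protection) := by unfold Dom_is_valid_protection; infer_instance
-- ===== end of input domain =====

-- B replaces A's enumerate loop with a regex fullmatch of (?:[r-][w-][x-]){3} (idiomatic).

-- ===== PORT A =====
-- the for-loop with early returns, over enumerate(protection)
def pvLoopA : List (Int × Char) → Bool
  | [] => true
  | (i, ch) :: rest =>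
    if (i = 0 ∨ i = 3 ∨ i = 6) ∧ ¬ (ch = 'r' ∨ ch = '-') then false
    else if (i = 1 ∨ i = 4 ∨ i = 7) ∧ ¬ (ch = 'w' ∨ ch = '-') then false
    else if (i = 2 ∨ i = 5 ∨ i = 8) ∧ ¬ (ch = 'x' ∨ ch = '-') then false
    else pvLoopA rest

def is_valid_protection (protection : String) : Bool :=
  if PySem.Str.len protection ≠ 9 then false
  else pvLoopA (PySem.List.enumerate protection.toList)

-- ===== PORT B =====
-- regex engine for the fixed pattern: match the group [r-][w-][x-] exactly n times, fullmatch
def pvMatchGroups : Nat → List Char → Bool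
  | 0, cs => cs.isEmpty
  | n + 1, a :: b :: c :: rest =>
    (a = 'r' || a = '-') && (b = 'w' || b = '-') && (c = 'x' || c = '-') &&
      pvMatchGroups n rest
  | _ + 1, _ => false

def is_valid_protection_alt (protection : String) : Bool :=
  pvMatchGroups 3 protection.toList

-- ===== PRECONDITION & SPEC =====
def Spec_is_valid_protection (protection : String) (out : Bool) : Prop := out = is_valid_protection_alt protection
instance (protection : String) (out : Bool) : Decidable (Spec_is_valid_protection protection out) := by unfold Spec_is_valid_protection; infer_instance

-- ===== CLAIM (what is proved, stated in full; the proofs are below) =====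
def Claim_equal_is_valid_protection : Prop := ∀ (protection : String), Dom_is_valid_protection protection → Spec_is_valid_protection protection (is_valid_protection protection)

-- ===== LEMMAS AND PROOFS =====

theorem pv_list_eq (l : List Char) :
    (if (l.length : Int) ≠ 9 then false else pvLoopA (PySem.List.enumerate l)) =
      pvMatchGroups 3 l := by
  match l with
  | [] => decide
  | [_] => simp [pvMatchGroups]
  | [_,_] => simp [pvMatchGroups]
  | [_,_,_] => simp [pvMatchGroups]
  | [_,_,_,_] => simp [pvMatchGroups]
  | [_,_,_,_,_] => simp [pvMatchGroups]
  | [_,_,_,_,_,_] => simp [pvMatchGroups]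
  | [_,_,_,_,_,_,_] => simp [pvMatchGroups]
  | [_,_,_,_,_,_,_,_] => simp [pvMatchGroups]
  | [a,b,c,d,e,f,g,h,i] =>
    simp only [List.length_cons, List.length_nil, PySem.List.enumerate,
      pvLoopA, pvMatchGroups, List.isEmpty_nil]
    norm_num
    simp [Bool.and_assoc]
  | _::_::_::_::_::_::_::_::_::_::rest =>
    simp only [pvMatchGroups, List.length_cons]
    rw [if_pos]
    · cases rest <;> simp
    · push_cast; omega

-- ===== VERDICT (by name: the statement is the Claim_ definition above) =====
theorem is_valid_protection_spec : Claim_equal_is_valid_protection := by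
  intro p _
  unfold Spec_is_valid_protection is_valid_protection is_valid_protection_alt
  simpa [PySem.Str.len] using pv_list_eq p.toList
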